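-- pv_equiv track=rewrite | github.com/LucaMenestrina/programming_luca_menestrina | final_14-02-2020/luca_menestrina_script.py | calc_matrices
-- ===== SOURCE A (Python) =====
-- def calc_matrices(sequence1,sequence2,scoring_matrix,gap):
--     F=[[0]*(len(sequence1)+1) for i in range(len(sequence2)+1)]
--     P=[[0]*(len(sequence1)+1) for i in range(len(sequence2)+1)]
--     for y in range(len(sequence2)+1):
--         for x in range(len(sequence1)+1):
--             if y==0:
--                 F[0][x]=gap*x
--                 P[0][x]="l"
--             elif x==0:
--                 F[y][0]=gap*y
--                 P[y][0]="t"
--             else: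
--                 sd=F[y-1][x-1]+scoring_matrix[sequence1[x-1]+sequence2[y-1]]
--                 st=F[y-1][x]+gap
--                 sl=F[y][x-1]+gap
--                 max_value=max(sd,st,sl)
--                 F[y][x]=max_value
--                 if max_value==sd:
--                     P[y][x]="d"
--                 elif max_value==st:
--                     P[y][x]="t"
--                 elif max_value==sl:
--                     P[y][x]="l"
--     P[0][0]="done"
--     return(F,P)
-- ===== SOURCE B (Python) =====
-- def calc_matrices(sequence1, sequence2, scoring_matrix, gap):
--     # top-down memoized recursion for the scores; traceback derived afterwards
--     # from the finished score matrix by local inspection (no fused fill loop)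
--     memo = {}
--
--     def score(y, x):
--         if (y, x) not in memo:
--             if y == 0:
--                 memo[(y, x)] = gap * x
--             elif x == 0:
--                 memo[(y, x)] = gap * y
--             else:
--                 memo[(y, x)] = max(
--                     score(y - 1, x - 1) + scoring_matrix[sequence1[x - 1] + sequence2[y - 1]],
--                     score(y - 1, x) + gap,
--                     score(y, x - 1) + gap)
--         return memo[(y, x)]
--
--     F = [[score(y, x) for x in range(len(sequence1) + 1)]
--          for y in range(len(sequence2) + 1)]
--
--     def pointer(y, x):
--         if y == 0:
--             return "done" if x == 0 else "l"
--         if x == 0: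
--             return "t"
--         if F[y][x] == F[y - 1][x - 1] + scoring_matrix[sequence1[x - 1] + sequence2[y - 1]]:
--             return "d"
--         if F[y][x] == F[y - 1][x] + gap:
--             return "t"
--         return "l"
--
--     P = [[pointer(y, x) for x in range(len(sequence1) + 1)]
--          for y in range(len(sequence2) + 1)]
--     return (F, P)
-- ===== Notes on version B (the rewrite author's own statement) =====
-- stated objective: alternative
-- what changed: B replaces A's fused single-pass table fill (boundary branches plus per-cell score-and-pointer assignment into preallocated zero matrices) by a top-down memoized recursive definition of the score function, from which F is tabulated, and a separate second pass that derives each traceback pointer purely by local inspection of the finished score matrix; pointers are never stored during scoring.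
import Mathlib
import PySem

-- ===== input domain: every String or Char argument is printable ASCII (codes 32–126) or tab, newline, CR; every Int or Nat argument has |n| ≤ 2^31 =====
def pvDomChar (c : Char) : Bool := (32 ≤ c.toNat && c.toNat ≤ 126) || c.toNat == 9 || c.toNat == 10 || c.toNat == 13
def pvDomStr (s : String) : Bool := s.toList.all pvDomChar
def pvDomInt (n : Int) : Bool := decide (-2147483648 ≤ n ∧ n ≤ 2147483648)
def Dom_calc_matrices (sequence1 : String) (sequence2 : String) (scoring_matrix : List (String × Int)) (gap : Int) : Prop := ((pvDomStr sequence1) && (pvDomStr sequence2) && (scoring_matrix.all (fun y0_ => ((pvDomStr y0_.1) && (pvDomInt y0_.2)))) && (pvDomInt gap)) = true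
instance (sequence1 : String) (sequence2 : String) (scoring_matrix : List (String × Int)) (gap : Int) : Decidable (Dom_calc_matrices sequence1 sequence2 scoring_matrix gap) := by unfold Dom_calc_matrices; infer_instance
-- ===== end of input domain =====

-- B replaces A's fused fill loop by a top-down memoized recursion for the score matrix and a
-- separate pass deriving each traceback pointer from the finished score matrix; objective:
-- alternative decomposition (same asymptotic cost). Equivalence is over the return value.


-- ===== PORT A =====
-- helper: F[y][x] = v on a list-of-lists (indices always in range where A uses it)
def pvSet2 {α : Type} (m : List (List α)) (y x : Int) (v : α) : List (List α) :=
  PySem.List.pySetD m y (PySem.List.pySetD (PySem.List.pyGetD m y []) x v)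

-- the body of A's fused inner loop (y, x from the two ranges); dict lookup is first-match on the
-- association list; `.getD 0` is exact because Pre_ guarantees the key is present (else KeyError)
def pvStepA (scoring_matrix : List (String × Int)) (gap : Int) (l1 l2 : List Char) (y : Int)
    (st : List (List Int) × List (List String)) (x : Int) :
    List (List Int) × List (List String) :=
  let F := st.1
  let P := st.2
  if y = 0 then
    (pvSet2 F 0 x (gap * x), pvSet2 P 0 x "l")
  else if x = 0 then
    (pvSet2 F y 0 (gap * y), pvSet2 P y 0 "t")
  else
    let sd := PySem.List.pyGetD (PySem.List.pyGetD F (y - 1) []) (x - 1) 0 +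
      (PySem.Dict.get? (PySem.Dict.mk scoring_matrix)
        (String.ofList [PySem.List.pyGetD l1 (x - 1) ' ', PySem.List.pyGetD l2 (y - 1) ' '])).getD 0
    let stv := PySem.List.pyGetD (PySem.List.pyGetD F (y - 1) []) x 0 + gap
    let sl := PySem.List.pyGetD (PySem.List.pyGetD F y []) (x - 1) 0 + gap
    let mv := max sd (max stv sl)
    let F' := pvSet2 F y x mv
    -- Python: P's cell is written only in the branch that fires (one always does)
    let P' := if mv = sd then pvSet2 P y x "d"
      else if mv = stv then pvSet2 P y x "t"
      else if mv = sl then pvSet2 P y x "l" else P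
    (F', P')

-- A's outer-loop body: the whole inner x-loop at a fixed y
def pvOuterA (scoring_matrix : List (String × Int)) (gap : Int) (l1 l2 : List Char)
    (st : List (List Int) × List (List String)) (y : Int) :
    List (List Int) × List (List String) :=
  (PySem.List.pyRange 0 ((l1.length : Int) + 1) 1).foldl (pvStepA scoring_matrix gap l1 l2 y) st

def calc_matrices (sequence1 : String) (sequence2 : String) (scoring_matrix : List (String × Int)) (gap : Int) : List (List Int) × List (List String) :=
  let l1 := sequence1.toList
  let l2 := sequence2.toList
  -- Python seeds P's cells with the int 0; every cell is overwritten before the return, so the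
  -- "" placeholder is exact on the result
  let F0 : List (List Int) := (List.range (l2.length + 1)).map (fun _ => List.replicate (l1.length + 1) 0)
  let P0 : List (List String) := (List.range (l2.length + 1)).map (fun _ => List.replicate (l1.length + 1) "")
  let st := (PySem.List.pyRange 0 ((l2.length : Int) + 1) 1).foldl (pvOuterA scoring_matrix gap l1 l2) (F0, P0)
  (st.1, pvSet2 st.2 0 0 "done")

-- ===== PORT B =====
-- Source B's scoring-matrix lookup at zero-based character indices y, x; `.getD 0` is exact under Pre_
def pvLook (l1 l2 : List Char) (sm : List (String × Int)) (y x : Nat) : Int :=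
  (PySem.Dict.get? (PySem.Dict.mk sm) (String.ofList [l1.getD x ' ', l2.getD y ' '])).getD 0

-- Source B's `score`: top-down recursion with the memo dict threaded explicitly (keys are the
-- Python (y, x) int pairs); `l1.getD`/`l2.getD` are exact since score is only reached in range
def pvScoreB (l1 l2 : List Char) (sm : List (String × Int)) (gap : Int) :
    Nat → Nat → PySem.Dict (Int × Int) Int → Int × PySem.Dict (Int × Int) Int
  | 0, x, m =>
    match m.get? ((0 : Int), (x : Int)) with
    | some v => (v, m)
    | none => (gap * (x : Int), m.insert ((0 : Int), (x : Int)) (gap * (x : Int)))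
  | y+1, 0, m =>
    match m.get? (((y+1 : Nat) : Int), (0 : Int)) with
    | some v => (v, m)
    | none => (gap * ((y+1 : Nat) : Int), m.insert (((y+1 : Nat) : Int), (0 : Int)) (gap * ((y+1 : Nat) : Int)))
  | y+1, x+1, m =>
    match m.get? (((y+1 : Nat) : Int), ((x+1 : Nat) : Int)) with
    | some v => (v, m)
    | none =>
      let r1 := pvScoreB l1 l2 sm gap y x m
      let r2 := pvScoreB l1 l2 sm gap y (x+1) r1.2
      let r3 := pvScoreB l1 l2 sm gap (y+1) x r2.2
      let v := max (r1.1 + pvLook l1 l2 sm y x) (max (r2.1 + gap) (r3.1 + gap))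
      (v, r3.2.insert (((y+1 : Nat) : Int), ((x+1 : Nat) : Int)) v)
  termination_by y x _ => (y, x)

-- one cell of the F-comprehension: call score, append its value, keep the updated memo
def pvCellScore (l1 l2 : List Char) (sm : List (String × Int)) (gap : Int) (y : Nat)
    (racc : List Int × PySem.Dict (Int × Int) Int) (x : Nat) :
    List Int × PySem.Dict (Int × Int) Int :=
  let s := pvScoreB l1 l2 sm gap y x racc.2
  (racc.1 ++ [s.1], s.2)

-- one row of the F-comprehension
def pvRowScore (l1 l2 : List Char) (sm : List (String × Int)) (gap : Int)
    (acc : List (List Int) × PySem.Dict (Int × Int) Int) (y : Nat) :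
    List (List Int) × PySem.Dict (Int × Int) Int :=
  let r := (List.range (l1.length + 1)).foldl (pvCellScore l1 l2 sm gap y) ([], acc.2)
  (acc.1 ++ [r.1], r.2)

-- Source B's `pointer`: reads only the finished score matrix F
def pvPointerB (l1 l2 : List Char) (sm : List (String × Int)) (gap : Int)
    (F : List (List Int)) (y x : Nat) : String :=
  if y = 0 then (if x = 0 then "done" else "l")
  else if x = 0 then "t"
  else if PySem.List.pyGetD (PySem.List.pyGetD F (y : Int) []) (x : Int) 0
      = PySem.List.pyGetD (PySem.List.pyGetD F ((y : Int) - 1) []) ((x : Int) - 1) 0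
        + pvLook l1 l2 sm (y - 1) (x - 1) then "d"
  else if PySem.List.pyGetD (PySem.List.pyGetD F (y : Int) []) (x : Int) 0
      = PySem.List.pyGetD (PySem.List.pyGetD F ((y : Int) - 1) []) (x : Int) 0 + gap then "t"
  else "l"

def calc_matrices_alt (sequence1 : String) (sequence2 : String) (scoring_matrix : List (String × Int)) (gap : Int) : List (List Int) × List (List String) :=
  let l1 := sequence1.toList
  let l2 := sequence2.toList
  let res := (List.range (l2.length + 1)).foldl (pvRowScore l1 l2 scoring_matrix gap)
    ([], PySem.Dict.mk [])
  let F := res.1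
  let P := (List.range (l2.length + 1)).map
    (fun y => (List.range (l1.length + 1)).map (fun x => pvPointerB l1 l2 scoring_matrix gap F y x))
  (F, P)

-- ===== PRECONDITION & SPEC =====
-- Pre_ excludes exactly the inputs on which Python A raises KeyError: some adjacent character
-- pair of the two sequences is missing from the scoring matrix.
def Pre_calc_matrices (sequence1 : String) (sequence2 : String) (scoring_matrix : List (String × Int)) (gap : Int) : Prop :=
  (sequence1.toList.all (fun c1 => sequence2.toList.all (fun c2 =>
    (PySem.Dict.get? (PySem.Dict.mk scoring_matrix) (String.ofList [c1, c2])).isSome))) = true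
instance (sequence1 : String) (sequence2 : String) (scoring_matrix : List (String × Int)) (gap : Int) : Decidable (Pre_calc_matrices sequence1 sequence2 scoring_matrix gap) := by unfold Pre_calc_matrices; infer_instance

def pvWitness_calc_matrices : String × String × (List (String × Int)) × Int :=
  ("ab", "ba", [("aa", 2), ("ab", -1), ("ba", -1), ("bb", 2)], -2)

def Spec_calc_matrices (sequence1 : String) (sequence2 : String) (scoring_matrix : List (String × Int)) (gap : Int) (out : List (List Int) × List (List String)) : Prop := out = calc_matrices_alt sequence1 sequence2 scoring_matrix gap
instance (sequence1 : String) (sequence2 : String) (scoring_matrix : List (String × Int)) (gap : Int) (out : List (List Int) × List (List String)) : Decidable (Spec_calc_matrices sequence1 sequence2 scoring_matrix gap out) := by unfold Spec_calc_matrices; infer_instance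

-- ===== CLAIM (what is proved, stated in full; the proofs are below) =====
def Claim_equal_calc_matrices : Prop := ∀ (sequence1 : String) (sequence2 : String) (scoring_matrix : List (String × Int)) (gap : Int), Dom_calc_matrices sequence1 sequence2 scoring_matrix gap → Pre_calc_matrices sequence1 sequence2 scoring_matrix gap → Spec_calc_matrices sequence1 sequence2 scoring_matrix gap (calc_matrices sequence1 sequence2 scoring_matrix gap)

-- ===== LEMMAS AND PROOFS =====
theorem pvWitness_ok : Dom_calc_matrices pvWitness_calc_matrices.1 pvWitness_calc_matrices.2.1 pvWitness_calc_matrices.2.2.1 pvWitness_calc_matrices.2.2.2 ∧ Pre_calc_matrices pvWitness_calc_matrices.1 pvWitness_calc_matrices.2.1 pvWitness_calc_matrices.2.2.1 pvWitness_calc_matrices.2.2.2 := by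
  constructor <;> decide

-- the mathematical score function both programs tabulate
def pvSpec (l1 l2 : List Char) (sm : List (String × Int)) (gap : Int) : Nat → Nat → Int
  | 0, x => gap * (x : Int)
  | y+1, 0 => gap * ((y+1 : Nat) : Int)
  | y+1, x+1 =>
    max (pvSpec l1 l2 sm gap y x + pvLook l1 l2 sm y x)
      (max (pvSpec l1 l2 sm gap y (x+1) + gap) (pvSpec l1 l2 sm gap (y+1) x + gap))
  termination_by y x => (y, x)

-- the traceback pointer both programs produce (tie order d, t, l)
def pvPtr (l1 l2 : List Char) (sm : List (String × Int)) (gap : Int) : Nat → Nat → String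
  | 0, 0 => "done"
  | 0, _+1 => "l"
  | _+1, 0 => "t"
  | y+1, x+1 =>
    if pvSpec l1 l2 sm gap (y+1) (x+1) = pvSpec l1 l2 sm gap y x + pvLook l1 l2 sm y x then "d"
    else if pvSpec l1 l2 sm gap (y+1) (x+1) = pvSpec l1 l2 sm gap y (x+1) + gap then "t"
    else "l"

-- memo invariant: every stored value is the true score
def pvInv (l1 l2 : List Char) (sm : List (String × Int)) (gap : Int)
    (m : PySem.Dict (Int × Int) Int) : Prop :=
  ∀ (y x : Nat) (v : Int), m.get? ((y : Int), (x : Int)) = some v → v = pvSpec l1 l2 sm gap y x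

theorem pvInv_insert (l1 l2 : List Char) (sm : List (String × Int)) (gap : Int)
    (m : PySem.Dict (Int × Int) Int) (h : pvInv l1 l2 sm gap m) (a b : Nat) :
    pvInv l1 l2 sm gap (m.insert (((a : Nat) : Int), ((b : Nat) : Int)) (pvSpec l1 l2 sm gap a b)) := by
  intro y x v hg
  rw [PySem.Dict.get?_insert] at hg
  split at hg
  · rename_i hk
    have hy : (y : Int) = (a : Int) := congrArg Prod.fst hk
    have hx : (x : Int) = (b : Int) := congrArg Prod.snd hk
    have hya : y = a := by exact_mod_cast hy
    have hxb : x = b := by exact_mod_cast hx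
    subst hya; subst hxb
    exact (Option.some.inj hg).symm
  · exact h y x v hg

theorem pvScoreB_correct (l1 l2 : List Char) (sm : List (String × Int)) (gap : Int)
    (y x : Nat) (m : PySem.Dict (Int × Int) Int) (h : pvInv l1 l2 sm gap m) :
    (pvScoreB l1 l2 sm gap y x m).1 = pvSpec l1 l2 sm gap y x ∧
    pvInv l1 l2 sm gap (pvScoreB l1 l2 sm gap y x m).2 := by
  match y, x with
  | 0, x =>
    cases hg : m.get? ((0 : Int), (x : Int)) with
    | some v =>
      have hv : v = pvSpec l1 l2 sm gap 0 x := h 0 x v (by exact_mod_cast hg)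
      constructor
      · simp only [pvScoreB, hg]; exact hv
      · simp only [pvScoreB, hg]; exact h
    | none =>
      have hval : pvSpec l1 l2 sm gap 0 x = gap * (x : Int) := by simp only [pvSpec]
      constructor
      · simp only [pvScoreB, hg]; exact hval.symm
      · have h2 := pvInv_insert l1 l2 sm gap m h 0 x
        rw [hval] at h2
        simp only [Nat.cast_zero] at h2
        simp only [pvScoreB, hg]
        exact h2
  | y+1, 0 =>
    cases hg : m.get? (((y+1 : Nat) : Int), (0 : Int)) with
    | some v =>
      have hv : v = pvSpec l1 l2 sm gap (y+1) 0 := h (y+1) 0 v (by exact_mod_cast hg)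
      constructor
      · simp only [pvScoreB, hg]; exact hv
      · simp only [pvScoreB, hg]; exact h
    | none =>
      have hval : pvSpec l1 l2 sm gap (y+1) 0 = gap * ((y+1 : Nat) : Int) := by
        simp only [pvSpec]
      constructor
      · simp only [pvScoreB, hg]; exact hval.symm
      · have h2 := pvInv_insert l1 l2 sm gap m h (y+1) 0
        rw [hval] at h2
        simp only [Nat.cast_zero] at h2
        simp only [pvScoreB, hg]
        exact h2
  | y+1, x+1 =>
    cases hg : m.get? (((y+1 : Nat) : Int), ((x+1 : Nat) : Int)) with
    | some v =>
      have hv : v = pvSpec l1 l2 sm gap (y+1) (x+1) := h (y+1) (x+1) v (by exact_mod_cast hg)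
      constructor
      · simp only [pvScoreB, hg]; exact hv
      · simp only [pvScoreB, hg]; exact h
    | none =>
      have i1 := pvScoreB_correct l1 l2 sm gap y x m h
      have i2 := pvScoreB_correct l1 l2 sm gap y (x+1) (pvScoreB l1 l2 sm gap y x m).2 i1.2
      have i3 := pvScoreB_correct l1 l2 sm gap (y+1) x
        (pvScoreB l1 l2 sm gap y (x+1) (pvScoreB l1 l2 sm gap y x m).2).2 i2.2
      have hv : max ((pvScoreB l1 l2 sm gap y x m).1 + pvLook l1 l2 sm y x)
          (max ((pvScoreB l1 l2 sm gap y (x+1) (pvScoreB l1 l2 sm gap y x m).2).1 + gap)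
            ((pvScoreB l1 l2 sm gap (y+1) x
              (pvScoreB l1 l2 sm gap y (x+1) (pvScoreB l1 l2 sm gap y x m).2).2).1 + gap))
          = pvSpec l1 l2 sm gap (y+1) (x+1) := by
        rw [i1.1, i2.1, i3.1]
        simp only [pvSpec]
      constructor
      · simp only [pvScoreB, hg]
        exact hv
      · have h2 := pvInv_insert l1 l2 sm gap _ i3.2 (y+1) (x+1)
        rw [← hv] at h2
        simp only [pvScoreB, hg]
        exact h2
termination_by (y, x)

theorem pvFoldRowB (l1 l2 : List Char) (sm : List (String × Int)) (gap : Int) (y : Nat) :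
    ∀ (l : List Nat) (acc : List Int) (m : PySem.Dict (Int × Int) Int), pvInv l1 l2 sm gap m →
    (l.foldl (pvCellScore l1 l2 sm gap y) (acc, m)).1 = acc ++ l.map (fun x => pvSpec l1 l2 sm gap y x) ∧
    pvInv l1 l2 sm gap (l.foldl (pvCellScore l1 l2 sm gap y) (acc, m)).2 := by
  intro l
  induction l with
  | nil =>
    intro acc m h
    constructor
    · simp
    · exact h
  | cons a t ih =>
    intro acc m h
    have hc := pvScoreB_correct l1 l2 sm gap y a m h
    rw [List.foldl_cons]
    have hstep : pvCellScore l1 l2 sm gap y (acc, m) a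
        = (acc ++ [(pvScoreB l1 l2 sm gap y a m).1], (pvScoreB l1 l2 sm gap y a m).2) := rfl
    rw [hstep]
    obtain ⟨e1, e2⟩ := ih (acc ++ [(pvScoreB l1 l2 sm gap y a m).1]) (pvScoreB l1 l2 sm gap y a m).2 hc.2
    refine ⟨?_, e2⟩
    rw [e1, hc.1]
    simp

theorem pvFoldTabB (l1 l2 : List Char) (sm : List (String × Int)) (gap : Int) :
    ∀ (l : List Nat) (acc : List (List Int)) (m : PySem.Dict (Int × Int) Int), pvInv l1 l2 sm gap m →
    (l.foldl (pvRowScore l1 l2 sm gap) (acc, m)).1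
      = acc ++ l.map (fun y => (List.range (l1.length + 1)).map (fun x => pvSpec l1 l2 sm gap y x)) ∧
    pvInv l1 l2 sm gap (l.foldl (pvRowScore l1 l2 sm gap) (acc, m)).2 := by
  intro l
  induction l with
  | nil =>
    intro acc m h
    constructor
    · simp
    · exact h
  | cons a t ih =>
    intro acc m h
    obtain ⟨r1, r2⟩ := pvFoldRowB l1 l2 sm gap a (List.range (l1.length + 1)) [] m h
    rw [List.foldl_cons]
    have hstep : pvRowScore l1 l2 sm gap (acc, m) a
        = (acc ++ [((List.range (l1.length + 1)).foldl (pvCellScore l1 l2 sm gap a) ([], m)).1],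
           ((List.range (l1.length + 1)).foldl (pvCellScore l1 l2 sm gap a) ([], m)).2) := rfl
    rw [hstep]
    obtain ⟨e1, e2⟩ := ih (acc ++ [((List.range (l1.length + 1)).foldl (pvCellScore l1 l2 sm gap a) ([], m)).1])
      ((List.range (l1.length + 1)).foldl (pvCellScore l1 l2 sm gap a) ([], m)).2 r2
    refine ⟨?_, e2⟩
    rw [e1, r1]
    simp

-- reading the finished score table turns Source B's pointer into the pure pointer
theorem pvPointerB_eq (l1 l2 : List Char) (sm : List (String × Int)) (gap : Int) (y x : Nat)
    (hy : y ≤ l2.length) (hx : x ≤ l1.length) :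
    pvPointerB l1 l2 sm gap
      ((List.range (l2.length + 1)).map (fun y => (List.range (l1.length + 1)).map (fun x => pvSpec l1 l2 sm gap y x)))
      y x = pvPtr l1 l2 sm gap y x := by
  match y, x with
  | 0, 0 => simp [pvPointerB, pvPtr]
  | 0, x+1 => simp [pvPointerB, pvPtr]
  | y+1, 0 => simp [pvPointerB, pvPtr]
  | y+1, x+1 =>
    have hy1 : y + 1 < l2.length + 1 := by omega
    have hy0 : y < l2.length + 1 := by omega
    have hx1 : x + 1 < l1.length + 1 := by omega
    have hx0 : x < l1.length + 1 := by omega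
    have ey : ((y+1 : Nat) : Int) - 1 = ((y : Nat) : Int) := by push_cast; ring
    have ex : ((x+1 : Nat) : Int) - 1 = ((x : Nat) : Int) := by push_cast; ring
    unfold pvPointerB
    rw [if_neg (by omega : ¬ (y+1 = 0)), if_neg (by omega : ¬ (x+1 = 0)), ey, ex]
    simp only [PySem.List.pyGetD_natCast,
      PySem.List.getD_map_range _ _ _ _ hy1, PySem.List.getD_map_range _ _ _ _ hy0,
      PySem.List.getD_map_range _ _ _ _ hx1, PySem.List.getD_map_range _ _ _ _ hx0,
      Nat.add_sub_cancel]
    simp [pvPtr]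

theorem pvAltB_eq (s1 s2 : String) (sm : List (String × Int)) (gap : Int) :
    calc_matrices_alt s1 s2 sm gap =
      ((List.range (s2.toList.length + 1)).map (fun y => (List.range (s1.toList.length + 1)).map (fun x => pvSpec s1.toList s2.toList sm gap y x)),
       (List.range (s2.toList.length + 1)).map (fun y => (List.range (s1.toList.length + 1)).map (fun x => pvPtr s1.toList s2.toList sm gap y x))) := by
  have hInv0 : pvInv s1.toList s2.toList sm gap (PySem.Dict.mk []) := by
    intro y x v hg
    have he : PySem.Dict.get? (PySem.Dict.mk ([] : List ((Int × Int) × Int))) ((y : Int), (x : Int)) = none := rfl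
    rw [he] at hg
    cases hg
  obtain ⟨hF, _⟩ := pvFoldTabB s1.toList s2.toList sm gap (List.range (s2.toList.length + 1)) [] (PySem.Dict.mk []) hInv0
  simp only [calc_matrices_alt]
  rw [hF]
  simp only [List.nil_append, Prod.mk.injEq]
  refine ⟨by trivial, ?_⟩
  apply List.map_congr_left
  intro y hy
  apply List.map_congr_left
  intro x hx
  exact pvPointerB_eq s1.toList s2.toList sm gap y x
    (by simpa using Nat.lt_succ_iff.mp (List.mem_range.mp hy))
    (by simpa using Nat.lt_succ_iff.mp (List.mem_range.mp hx))

-- ---- A-side: A's fused fill equals the same two tables ----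
-- proof-side row/table recursions describing A's loop
def pvCellB (scoring_matrix : List (String × Int)) (gap : Int) (prev : List Int) (c2 : Char)
    (rs : List Int × List String) (xc : Int × Char) : List Int × List String :=
  let x := xc.1
  let sd := PySem.List.pyGetD prev (x - 1) 0 +
    (PySem.Dict.get? (PySem.Dict.mk scoring_matrix) (String.ofList [xc.2, c2])).getD 0
  let stv := PySem.List.pyGetD prev x 0 + gap
  let sl := PySem.List.pyGetD rs.1 (x - 1) 0 + gap
  let mv := max sd (max stv sl)
  (rs.1 ++ [mv], rs.2 ++ [if mv = sd then "d" else if mv = stv then "t" else "l"])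

def pvRowB (scoring_matrix : List (String × Int)) (gap : Int) (l1 : List Char)
    (st : List (List Int) × List (List String) × List Int) (yc : Int × Char) :
    List (List Int) × List (List String) × List Int :=
  let rs := (PySem.List.enumerate l1 1).foldl (pvCellB scoring_matrix gap st.2.2 yc.2)
    ([gap * yc.1], ["t"])
  (st.1 ++ [rs.1], st.2.1 ++ [rs.2], rs.1)

def pvRowRec (sm : List (String × Int)) (gap : Int) (l1 : List Char) (c2 : Char) (prev : List Int) (y : Int) : Nat → List Int × List String
  | 0 => ([gap * y], ["t"])
  | k+1 => pvCellB sm gap prev c2 (pvRowRec sm gap l1 c2 prev y k) (1 + (k : Int), l1.getD k ' ')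

def pvOutRec (sm : List (String × Int)) (gap : Int) (l1 l2 : List Char) : Nat → List (List Int) × List (List String) × List Int
  | 0 => ([(PySem.List.pyRange 0 ((l1.length : Int) + 1) 1).map (fun x => gap * x)],
          ["done" :: List.replicate l1.length "l"],
          (PySem.List.pyRange 0 ((l1.length : Int) + 1) 1).map (fun x => gap * x))
  | Y+1 => pvRowB sm gap l1 (pvOutRec sm gap l1 l2 Y) (1 + (Y : Int), l2.getD Y ' ')

theorem pvCellB_foldl_len (sm : List (String × Int)) (gap : Int) (prev : List Int) (c2 : Char) :
    ∀ (l : List (Int × Char)) (init : List Int × List String),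
    ((l.foldl (pvCellB sm gap prev c2) init).1.length = init.1.length + l.length) := by
  intro l
  induction l with
  | nil => intro init; simp
  | cons a t ih =>
    intro init
    rw [List.foldl_cons, ih]
    simp [pvCellB]
    omega

theorem pvEnumTakeSucc {α : Type} (l : List α) (k : Nat) (s : Int) (h : k < l.length) :
    PySem.List.enumerate (l.take (k+1)) s = PySem.List.enumerate (l.take k) s ++ [(s + k, l[k])] := by
  rw [List.take_succ_eq_append_getElem h, PySem.List.enumerate_append]
  simp [min_eq_left (le_of_lt h)]

theorem pvRowRec_len (sm : List (String × Int)) (gap : Int) (l1 : List Char) (c2 : Char) (prev : List Int) (y : Int) :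
    ∀ k, ((pvRowRec sm gap l1 c2 prev y k).1.length = k+1) ∧ ((pvRowRec sm gap l1 c2 prev y k).2.length = k+1) := by
  intro k
  induction k with
  | zero => simp [pvRowRec]
  | succ k ih => simp [pvRowRec, pvCellB, ih.1, ih.2]

theorem pvRowB_inner_eq (sm : List (String × Int)) (gap : Int) (prev : List Int) (c2 : Char) (y : Int) (l1 : List Char) :
    ∀ k, k ≤ l1.length →
    (PySem.List.enumerate (l1.take k) 1).foldl (pvCellB sm gap prev c2) ([gap * y], ["t"])
      = pvRowRec sm gap l1 c2 prev y k := by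
  intro k
  induction k with
  | zero => simp [pvRowRec]
  | succ k ih =>
    intro h
    have hg : l1.getD k ' ' = l1[k] := List.getD_eq_getElem l1 ' ' (by omega)
    rw [pvEnumTakeSucc l1 k 1 (by omega), List.foldl_append, ih (by omega)]
    simp only [List.foldl_cons, List.foldl_nil, pvRowRec, hg]
    rfl

theorem pvOutRec_facts (sm : List (String × Int)) (gap : Int) (l1 l2 : List Char) :
    ∀ Y, ((pvOutRec sm gap l1 l2 Y).1.length = Y + 1) ∧
    ((pvOutRec sm gap l1 l2 Y).2.1.length = Y + 1) ∧
    ((pvOutRec sm gap l1 l2 Y).2.2 = (pvOutRec sm gap l1 l2 Y).1.getD Y []) ∧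
    ((pvOutRec sm gap l1 l2 Y).2.2.length = l1.length + 1) ∧
    ((pvOutRec sm gap l1 l2 Y).2.1 = ("done" :: List.replicate l1.length "l") :: (pvOutRec sm gap l1 l2 Y).2.1.tail) := by
  intro Y
  induction Y with
  | zero =>
    refine ⟨by simp [pvOutRec], by simp [pvOutRec], by simp [pvOutRec], ?_, by simp [pvOutRec]⟩
    simp [pvOutRec, PySem.List.length_pyRange_one]
  | succ Y ih =>
    obtain ⟨h1, h2, h3, h4, h5⟩ := ih
    refine ⟨?_, ?_, ?_, ?_, ?_⟩
    · simp [pvOutRec, pvRowB, h1]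
    · simp [pvOutRec, pvRowB, h2]
    · simp only [pvOutRec, pvRowB]
      rw [List.getD_append_right _ _ _ _ (by omega)]
      simp [h1]
    · simp only [pvOutRec, pvRowB]
      rw [pvCellB_foldl_len]
      simp [PySem.List.length_enumerate]
      omega
    · simp only [pvOutRec, pvRowB]
      rw [h5]
      simp

-- writing one cell: F[y][x] = v when y names the first row after D and x is in range
theorem pvSet2_append_cons {α : Type} (D R : List (List α)) (r : List α) (j : Nat) (v : α) :
    pvSet2 (D ++ r :: R) (D.length : Int) (j : Int) v = D ++ r.set j v :: R := by
  unfold pvSet2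
  simp only [PySem.List.pySetD_natCast, PySem.List.pyGetD_natCast]
  rw [List.getD_append_right _ _ _ _ (Nat.le_refl _)]
  simp only [Nat.sub_self, List.getD_cons_zero]
  rw [List.set_append_right _ _ (Nat.le_refl _)]
  simp

theorem pvSet2_cons_zero {α : Type} (R : List (List α)) (r : List α) (j : Nat) (v : α) :
    pvSet2 (r :: R) (0 : Int) (j : Int) v = r.set j v :: R := by
  have h := pvSet2_append_cons [] R r j v
  simpa using h

theorem pvGet2_self {α : Type} (D R : List (List α)) (r : List α) :
    PySem.List.pyGetD (D ++ r :: R) (D.length : Int) [] = r := by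
  simp only [PySem.List.pyGetD_natCast]
  rw [List.getD_append_right _ _ _ _ (Nat.le_refl _)]
  simp

theorem pvGet2_left {α : Type} (D R : List (List α)) (r : List α) (i : Nat) (h : i < D.length) :
    PySem.List.pyGetD (D ++ r :: R) (i : Int) [] = D.getD i [] := by
  simp only [PySem.List.pyGetD_natCast]
  rw [List.getD_append _ _ _ _ h]

theorem pvMax3 (a b c : Int) : max a (max b c) = a ∨ max a (max b c) = b ∨ max a (max b c) = c := by
  rcases max_choice a (max b c) with h|h
  · left; exact h
  rcases max_choice b c with h2|h2 <;> rw [h, h2] <;> simp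

theorem pvStepA_interior (sm : List (String × Int)) (gap : Int) (l1 l2 : List Char)
    (yn k : Nat) (D : List (List Int)) (E : List (List String))
    (RF : List (List Int)) (RP : List (List String)) (prev bF : List Int) (bP : List String)
    (hy : 1 ≤ yn) (hD : D.length = yn) (hE : E.length = yn)
    (hprev : D.getD (yn - 1) [] = prev)
    (hbF : bF.length = k + 1) (hbP : bP.length = k + 1) (hk : k < l1.length) :
    pvStepA sm gap l1 l2 (yn : Int)
      (D ++ (bF ++ List.replicate (l1.length - k) 0) :: RF,
       E ++ (bP ++ List.replicate (l1.length - k) "") :: RP) ((k : Int) + 1)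
    = (D ++ ((pvCellB sm gap prev (l2.getD (yn - 1) ' ') (bF, bP) (1 + (k : Int), l1.getD k ' ')).1
          ++ List.replicate (l1.length - (k + 1)) 0) :: RF,
       E ++ ((pvCellB sm gap prev (l2.getD (yn - 1) ' ') (bF, bP) (1 + (k : Int), l1.getD k ' ')).2
          ++ List.replicate (l1.length - (k + 1)) "") :: RP) := by
  have hyn0 : ((yn : Int)) ≠ 0 := by omega
  have hx0 : ((k : Int) + 1) ≠ 0 := by omega
  have hc1 : (yn : Int) - 1 = ((yn - 1 : Nat) : Int) := by omega
  have hxm1 : ((k : Int) + 1) - 1 = ((k : Nat) : Int) := by omega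
  have hxm1' : (1 + (k : Int)) - 1 = ((k : Nat) : Int) := by omega
  have hx1 : ((k : Int) + 1) = ((k + 1 : Nat) : Int) := by omega
  have hx1' : (1 + (k : Int)) = ((k + 1 : Nat) : Int) := by omega
  have hrep : List.replicate (l1.length - k) (0:Int) = 0 :: List.replicate (l1.length - (k+1)) 0 := by
    rw [show l1.length - k = (l1.length - (k+1)) + 1 by omega, List.replicate_succ]
  have hrepS : List.replicate (l1.length - k) ("") = "" :: List.replicate (l1.length - (k+1)) "" := by
    rw [show l1.length - k = (l1.length - (k+1)) + 1 by omega, List.replicate_succ]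
  have hg1 : PySem.List.pyGetD (D ++ (bF ++ List.replicate (l1.length - k) 0) :: RF) ((yn:Int) - 1) [] = prev := by
    rw [hc1, pvGet2_left D _ _ (yn-1) (by omega), hprev]
  have hg2 : PySem.List.pyGetD (D ++ (bF ++ List.replicate (l1.length - k) 0) :: RF) (yn:Int) [] =
      bF ++ List.replicate (l1.length - k) 0 := by
    rw [show (yn:Int) = ((D.length : Nat) : Int) by rw [hD]]
    exact pvGet2_self D _ _
  have hs1 : ∀ v : Int, pvSet2 (D ++ (bF ++ List.replicate (l1.length - k) 0) :: RF) (yn:Int) (((k+1 : Nat)) : Int) v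
      = D ++ (bF ++ v :: List.replicate (l1.length - (k+1)) 0) :: RF := by
    intro v
    rw [show (yn:Int) = ((D.length : Nat) : Int) by rw [hD], pvSet2_append_cons, hrep,
      List.set_append_right (k+1) v (by omega)]
    simp [hbF]
  have hs2 : ∀ v : String, pvSet2 (E ++ (bP ++ List.replicate (l1.length - k) "") :: RP) (yn:Int) (((k+1 : Nat)) : Int) v
      = E ++ (bP ++ v :: List.replicate (l1.length - (k+1)) "") :: RP := by
    intro v
    rw [show (yn:Int) = ((E.length : Nat) : Int) by rw [hE], pvSet2_append_cons, hrepS,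
      List.set_append_right (k+1) v (by omega)]
    simp [hbP]
  have hread : (bF ++ List.replicate (l1.length - k) (0:Int)).getD k 0 = bF.getD k 0 :=
    List.getD_append _ _ _ k (by omega)
  simp only [pvStepA, pvCellB, if_neg hyn0, if_neg hx0]
  rw [hxm1, hxm1', hg1, hg2, hc1]
  simp only [PySem.List.pyGetD_natCast, hread, hx1, hx1', hs1, hs2]
  split_ifs with h1 h2 h3
  · simp only [List.append_assoc, List.singleton_append]
  · simp only [List.append_assoc, List.singleton_append]
  · simp only [List.append_assoc, List.singleton_append]
  · exact absurd (((pvMax3 _ _ _).resolve_left h1).resolve_left h2) h3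

theorem pvInnerA0 (sm : List (String × Int)) (gap : Int) (l1 l2 : List Char)
    (RF : List (List Int)) (RP : List (List String)) :
    ∀ k, k ≤ l1.length →
    (PySem.List.pyRange 0 ((k : Int) + 1) 1).foldl (pvStepA sm gap l1 l2 0)
      (List.replicate (l1.length + 1) 0 :: RF, List.replicate (l1.length + 1) "" :: RP)
    = (((List.range (k+1)).map (fun (j : Nat) => gap * (j : Int)) ++ List.replicate (l1.length - k) 0) :: RF,
       (List.replicate (k+1) "l" ++ List.replicate (l1.length - k) "") :: RP) := by
  intro k
  induction k with
  | zero =>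
    intro _
    have h0 : PySem.List.pyRange 0 (((0:Nat) : Int) + 1) 1 = [0] := PySem.List.pyRange_one_singleton 0
    rw [h0]
    simp only [List.foldl_cons, List.foldl_nil, pvStepA]
    have hf := pvSet2_cons_zero RF (List.replicate (l1.length + 1) (0:Int)) 0 (gap * 0)
    have hp := pvSet2_cons_zero RP (List.replicate (l1.length + 1) "") 0 "l"
    simp only [Nat.cast_zero] at hf hp
    rw [hf, hp, List.replicate_succ, List.replicate_succ]
    simp
  | succ k ih =>
    intro h
    have hc : ((k+1 : Nat) : Int) + 1 = (((k : Nat) : Int) + 1) + 1 := by push_cast; ring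
    rw [hc, PySem.List.pyRange_one_succ_right (by omega), List.foldl_append, ih (by omega),
      List.foldl_cons, List.foldl_nil]
    simp only [pvStepA]
    have hx1 : ((k : Int) + 1) = ((k + 1 : Nat) : Int) := by omega
    rw [hx1]
    have hmlen : ((List.range (k+1)).map (fun (j : Nat) => gap * (j : Int))).length = k + 1 := by simp
    have hrep : List.replicate (l1.length - k) (0:Int) = 0 :: List.replicate (l1.length - (k+1)) 0 := by
      rw [show l1.length - k = (l1.length - (k+1)) + 1 by omega, List.replicate_succ]
    have hrepS : List.replicate (l1.length - k) ("") = "" :: List.replicate (l1.length - (k+1)) "" := by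
      rw [show l1.length - k = (l1.length - (k+1)) + 1 by omega, List.replicate_succ]
    have hf := pvSet2_cons_zero RF ((List.range (k+1)).map (fun (j : Nat) => gap * (j : Int)) ++ List.replicate (l1.length - k) 0) (k+1) (gap * ((k+1 : Nat) : Int))
    have hp := pvSet2_cons_zero RP (List.replicate (k+1) "l" ++ List.replicate (l1.length - k) "") (k+1) "l"
    rw [hf, hp, hrep, hrepS, List.set_append_right (k+1) _ (by simp), List.set_append_right (k+1) _ (by simp)]
    simp only [hmlen, List.length_replicate, Nat.sub_self, List.set_cons_zero, if_true]
    have hm2 : (List.range (k+1+1)).map (fun (j : Nat) => gap * (j : Int)) = (List.range (k+1)).map (fun (j : Nat) => gap * (j : Int)) ++ [gap * ((k+1:Nat):Int)] := by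
      rw [List.range_succ]; simp
    have hl2 : List.replicate (k+1+1) "l" = List.replicate (k+1) "l" ++ ["l"] := List.replicate_succ'
    rw [hm2, hl2]
    simp only [List.append_assoc, List.singleton_append]

theorem pvInnerA (sm : List (String × Int)) (gap : Int) (l1 l2 : List Char) (yn : Nat)
    (D : List (List Int)) (E : List (List String)) (RF : List (List Int)) (RP : List (List String))
    (prev : List Int) (hy : 1 ≤ yn) (hD : D.length = yn) (hE : E.length = yn)
    (hprev : D.getD (yn - 1) [] = prev) :
    ∀ k, k ≤ l1.length →
    (PySem.List.pyRange 0 ((k : Int) + 1) 1).foldl (pvStepA sm gap l1 l2 (yn : Int))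
      (D ++ List.replicate (l1.length + 1) 0 :: RF, E ++ List.replicate (l1.length + 1) "" :: RP)
    = (D ++ ((pvRowRec sm gap l1 (l2.getD (yn-1) ' ') prev (yn : Int) k).1 ++ List.replicate (l1.length - k) 0) :: RF,
       E ++ ((pvRowRec sm gap l1 (l2.getD (yn-1) ' ') prev (yn : Int) k).2 ++ List.replicate (l1.length - k) "") :: RP) := by
  have hyn0 : ((yn : Int)) ≠ 0 := by omega
  intro k
  induction k with
  | zero =>
    intro _
    have h0 : PySem.List.pyRange 0 (((0:Nat) : Int) + 1) 1 = [0] := PySem.List.pyRange_one_singleton 0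
    rw [h0]
    simp only [List.foldl_cons, List.foldl_nil]
    simp only [pvStepA]
    rw [if_neg hyn0]
    simp only [if_true]
    have hf : pvSet2 (D ++ List.replicate (l1.length + 1) 0 :: RF) (yn : Int) 0 (gap * (yn : Int))
        = D ++ (List.replicate (l1.length + 1) (0:Int)).set 0 (gap * (yn : Int)) :: RF := by
      rw [show ((yn : Nat) : Int) = ((D.length : Nat) : Int) by rw [hD]]
      simpa using pvSet2_append_cons D RF (List.replicate (l1.length + 1) (0:Int)) 0 (gap * ((D.length : Nat) : Int))
    have hp : pvSet2 (E ++ List.replicate (l1.length + 1) "" :: RP) (yn : Int) 0 "t"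
        = E ++ (List.replicate (l1.length + 1) "").set 0 "t" :: RP := by
      rw [show ((yn : Nat) : Int) = ((E.length : Nat) : Int) by rw [hE]]
      simpa using pvSet2_append_cons E RP (List.replicate (l1.length + 1) "") 0 "t"
    rw [hf, hp, List.replicate_succ, List.replicate_succ]
    simp [pvRowRec]
  | succ k ih =>
    intro h
    have hc : ((k+1 : Nat) : Int) + 1 = (((k : Nat) : Int) + 1) + 1 := by push_cast; ring
    rw [hc, PySem.List.pyRange_one_succ_right (by omega), List.foldl_append, ih (by omega),
      List.foldl_cons, List.foldl_nil]
    rw [pvStepA_interior sm gap l1 l2 yn k D E RF RP prev _ _ hy hD hE hprev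
      (pvRowRec_len sm gap l1 (l2.getD (yn-1) ' ') prev (yn : Int) k).1
      (pvRowRec_len sm gap l1 (l2.getD (yn-1) ' ') prev (yn : Int) k).2 (by omega)]
    simp only [pvRowRec]

theorem pvOuterA_eq (sm : List (String × Int)) (gap : Int) (l1 l2 : List Char) :
    ∀ Y, Y ≤ l2.length →
    (PySem.List.pyRange 0 ((Y : Int) + 1) 1).foldl (pvOuterA sm gap l1 l2)
      (List.replicate (l2.length + 1) (List.replicate (l1.length + 1) 0),
       List.replicate (l2.length + 1) (List.replicate (l1.length + 1) ""))
    = ((pvOutRec sm gap l1 l2 Y).1 ++ List.replicate (l2.length - Y) (List.replicate (l1.length + 1) 0),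
       (List.replicate (l1.length + 1) "l" :: (pvOutRec sm gap l1 l2 Y).2.1.tail)
         ++ List.replicate (l2.length - Y) (List.replicate (l1.length + 1) "")) := by
  intro Y
  induction Y with
  | zero =>
    intro _
    have h0 : PySem.List.pyRange 0 (((0:Nat) : Int) + 1) 1 = [0] := PySem.List.pyRange_one_singleton 0
    rw [h0]
    simp only [List.foldl_cons, List.foldl_nil, pvOuterA]
    have eF : List.replicate (l2.length+1) (List.replicate (l1.length+1) (0:Int))
        = List.replicate (l1.length+1) 0 :: List.replicate l2.length (List.replicate (l1.length+1) 0) :=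
      List.replicate_succ
    have eP : List.replicate (l2.length+1) (List.replicate (l1.length+1) "")
        = List.replicate (l1.length+1) "" :: List.replicate l2.length (List.replicate (l1.length+1) "") :=
      List.replicate_succ
    rw [eF, eP, pvInnerA0 sm gap l1 l2 _ _ l1.length le_rfl]
    have hrow : (List.range (l1.length+1)).map (fun (j : Nat) => gap * (j : Int))
        = (PySem.List.pyRange 0 ((l1.length : Int) + 1) 1).map (fun x => gap * x) := by
      rw [PySem.List.pyRange_one, show (((l1.length : Int) + 1) - 0).toNat = l1.length + 1 by omega]
      simp [List.map_map, Function.comp_def]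
    simp [pvOutRec, hrow]
  | succ Y ih =>
    intro h
    obtain ⟨h1, h2, h3, h4, h5⟩ := pvOutRec_facts sm gap l1 l2 Y
    have hc : ((Y+1 : Nat) : Int) + 1 = (((Y : Nat) : Int) + 1) + 1 := by push_cast; ring
    rw [hc, PySem.List.pyRange_one_succ_right (by omega), List.foldl_append, ih (by omega),
      List.foldl_cons, List.foldl_nil]
    simp only [pvOuterA]
    have eF : List.replicate (l2.length - Y) (List.replicate (l1.length+1) (0:Int))
        = List.replicate (l1.length+1) 0 :: List.replicate (l2.length - (Y+1)) (List.replicate (l1.length+1) 0) := by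
      rw [show l2.length - Y = (l2.length - (Y+1)) + 1 by omega]
      exact List.replicate_succ
    have eP : List.replicate (l2.length - Y) (List.replicate (l1.length+1) "")
        = List.replicate (l1.length+1) "" :: List.replicate (l2.length - (Y+1)) (List.replicate (l1.length+1) "") := by
      rw [show l2.length - Y = (l2.length - (Y+1)) + 1 by omega]
      exact List.replicate_succ
    rw [eF, eP, show ((Y : Int) + 1) = ((Y+1 : Nat) : Int) by push_cast; ring]
    rw [pvInnerA sm gap l1 l2 (Y+1)
      (pvOutRec sm gap l1 l2 Y).1
      (List.replicate (l1.length + 1) "l" :: (pvOutRec sm gap l1 l2 Y).2.1.tail)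
      _ _ (pvOutRec sm gap l1 l2 Y).2.2 (by omega) h1
      (by simp; omega)
      (by simpa using h3.symm)
      l1.length le_rfl]
    have hrowB := pvRowB_inner_eq sm gap (pvOutRec sm gap l1 l2 Y).2.2 (l2.getD Y ' ')
      (1 + (Y : Int)) l1 l1.length le_rfl
    rw [List.take_length] at hrowB
    have hyy : ((Y+1 : Nat) : Int) = 1 + (Y : Int) := by push_cast; ring
    simp only [Nat.add_sub_cancel, Nat.sub_self, List.replicate_zero, List.append_nil, hyy]
    simp only [pvOutRec, pvRowB, hrowB]
    simp only [Prod.mk.injEq]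
    refine ⟨?_, ?_⟩
    · simp [List.append_assoc]
    · conv_rhs => rw [h5]
      simp [List.append_assoc]

-- ---- bridging A's row recursion to the pure score/pointer tables ----
theorem pvRowRec_spec (sm : List (String × Int)) (gap : Int) (l1 l2 : List Char) (y : Nat) :
    ∀ k, k ≤ l1.length →
    pvRowRec sm gap l1 (l2.getD y ' ')
      ((List.range (l1.length + 1)).map (fun x => pvSpec l1 l2 sm gap y x)) (1 + (y : Int)) k
    = ((List.range (k + 1)).map (fun x => pvSpec l1 l2 sm gap (y+1) x),
       (List.range (k + 1)).map (fun x => pvPtr l1 l2 sm gap (y+1) x)) := by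
  intro k
  induction k with
  | zero =>
    intro _
    have e0 : pvSpec l1 l2 sm gap (y+1) 0 = gap * (1 + (y : Int)) := by
      simp only [pvSpec]; push_cast; ring
    simp [pvRowRec, pvPtr, e0]
  | succ k ih =>
    intro h
    simp only [pvRowRec]
    rw [ih (by omega)]
    simp only [pvCellB]
    have e1 : (1 + (k : Int)) - 1 = ((k : Nat) : Int) := by ring
    have e2 : (1 + (k : Int)) = ((k+1 : Nat) : Int) := by push_cast; ring
    rw [e1]
    simp only [e2, PySem.List.pyGetD_natCast,
      PySem.List.getD_map_range _ _ _ _ (by omega : k < l1.length + 1),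
      PySem.List.getD_map_range _ _ _ _ (by omega : k + 1 < l1.length + 1),
      PySem.List.getD_map_range _ _ _ _ (by omega : k < k + 1)]
    have hlook : (PySem.Dict.get? (PySem.Dict.mk sm)
        (String.ofList [l1.getD k ' ', l2.getD y ' '])).getD 0 = pvLook l1 l2 sm y k := rfl
    rw [hlook]
    have hm : max (pvSpec l1 l2 sm gap y k + pvLook l1 l2 sm y k)
        (max (pvSpec l1 l2 sm gap y (k+1) + gap) (pvSpec l1 l2 sm gap (y+1) k + gap))
        = pvSpec l1 l2 sm gap (y+1) (k+1) := by
      simp [pvSpec]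
    rw [hm]
    have hp : (if pvSpec l1 l2 sm gap (y+1) (k+1) = pvSpec l1 l2 sm gap y k + pvLook l1 l2 sm y k then "d"
        else if pvSpec l1 l2 sm gap (y+1) (k+1) = pvSpec l1 l2 sm gap y (k+1) + gap then "t" else "l")
        = pvPtr l1 l2 sm gap (y+1) (k+1) := by
      simp [pvPtr]
    rw [hp]
    simp [List.range_succ]

theorem pvOutRec_spec (sm : List (String × Int)) (gap : Int) (l1 l2 : List Char) :
    ∀ Y, Y ≤ l2.length →
    pvOutRec sm gap l1 l2 Y
    = ((List.range (Y + 1)).map (fun y => (List.range (l1.length + 1)).map (fun x => pvSpec l1 l2 sm gap y x)),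
       (List.range (Y + 1)).map (fun y => (List.range (l1.length + 1)).map (fun x => pvPtr l1 l2 sm gap y x)),
       (List.range (l1.length + 1)).map (fun x => pvSpec l1 l2 sm gap Y x)) := by
  intro Y
  induction Y with
  | zero =>
    intro _
    have hrow : (PySem.List.pyRange 0 ((l1.length : Int) + 1) 1).map (fun x => gap * x)
        = (List.range (l1.length + 1)).map (fun x => pvSpec l1 l2 sm gap 0 x) := by
      rw [PySem.List.pyRange_one, show (((l1.length : Int) + 1) - 0).toNat = l1.length + 1 by omega]
      simp [List.map_map, Function.comp_def, pvSpec]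
    have hptr : (List.range (l1.length + 1)).map (fun x => pvPtr l1 l2 sm gap 0 x)
        = "done" :: List.replicate l1.length "l" := by
      rw [List.range_succ_eq_map, List.map_cons, List.map_map]
      have : (fun x => pvPtr l1 l2 sm gap 0 x) ∘ Nat.succ = fun _ => "l" := by
        funext j; simp [Function.comp, pvPtr]
      rw [this]
      simp [pvPtr, List.map_const']
    simp only [pvOutRec, hrow, ← hptr]
    simp
  | succ Y ih =>
    intro h
    simp only [pvOutRec]
    rw [ih (by omega)]
    simp only [pvRowB]
    have hinner := pvRowB_inner_eq sm gap
      ((List.range (l1.length + 1)).map (fun x => pvSpec l1 l2 sm gap Y x))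
      (l2.getD Y ' ') (1 + (Y : Int)) l1 l1.length le_rfl
    rw [List.take_length] at hinner
    rw [hinner, pvRowRec_spec sm gap l1 l2 Y l1.length (by omega)]
    rw [show Y + 1 + 1 = (Y+1) + 1 from rfl, List.range_succ (n := Y + 1)]
    simp

-- ===== VERDICT (by name: the statement is the Claim_ definition above) =====
theorem calc_matrices_spec : Claim_equal_calc_matrices := by
  unfold Claim_equal_calc_matrices
  intro s1 s2 sm gap _ _
  unfold Spec_calc_matrices
  show calc_matrices s1 s2 sm gap = calc_matrices_alt s1 s2 sm gap
  simp only [calc_matrices]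
  rw [show (List.range (s2.toList.length + 1)).map (fun _ => List.replicate (s1.toList.length + 1) (0:Int))
      = List.replicate (s2.toList.length + 1) (List.replicate (s1.toList.length + 1) 0) by
    simp [List.map_const']]
  rw [show (List.range (s2.toList.length + 1)).map (fun _ => List.replicate (s1.toList.length + 1) "")
      = List.replicate (s2.toList.length + 1) (List.replicate (s1.toList.length + 1) "") by
    simp [List.map_const']]
  rw [pvOuterA_eq sm gap s1.toList s2.toList s2.toList.length le_rfl]
  obtain ⟨h1, h2, h3, h4, h5⟩ := pvOutRec_facts sm gap s1.toList s2.toList s2.toList.length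
  rw [pvAltB_eq]
  simp only [Nat.sub_self, List.replicate_zero, List.append_nil]
  have hset := pvSet2_cons_zero ((pvOutRec sm gap s1.toList s2.toList s2.toList.length).2.1.tail)
    (List.replicate (s1.toList.length + 1) "l") 0 "done"
  simp only [Nat.cast_zero] at hset
  rw [hset]
  have hdone : (List.replicate (s1.toList.length + 1) "l").set 0 "done"
      = "done" :: List.replicate s1.toList.length "l" := by
    rw [List.replicate_succ, List.set_cons_zero]
  rw [hdone, ← h5, pvOutRec_spec sm gap s1.toList s2.toList s2.toList.length le_rfl]
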